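-- pv_equiv track=rewrite | github.com/pypi-data/pypi-mirror-402 | packages/langchain-pdf/langchain_pdf-0.2.0.tar.gz/langchain_pdf-0.2.0/langchain_pdf/normalizer.py | _remove_duplicate_titles
-- ===== SOURCE A (Python) =====
-- from typing import List
--
-- def _remove_duplicate_titles(lines: List[str]) -> List[str]:
--     """Keep only the first H1 title."""
--     seen_h1 = False
--     result: List[str] = []
--
--     for line in lines:
--         if line.startswith("# "):
--             if seen_h1:
--                 continue
--             seen_h1 = True
--         result.append(line)
--
--     return result
-- ===== SOURCE B (Python) =====
-- from typing import List
--
-- def _remove_duplicate_titles(lines: List[str]) -> List[str]: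
--     """Keep only the first H1 title."""
--     first = next((i for i, l in enumerate(lines) if l.startswith("# ")), None)
--     return [l for i, l in enumerate(lines) if not l.startswith("# ") or i == first]
-- ===== Notes on version B (the rewrite author's own statement) =====
-- stated objective: alternative
-- what changed: Replaced A's single stateful scan with a seen_h1 flag and early continue by a two-pass shape: precompute the index of the first H1 line, then filter by index in one comprehension.
import Mathlib
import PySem

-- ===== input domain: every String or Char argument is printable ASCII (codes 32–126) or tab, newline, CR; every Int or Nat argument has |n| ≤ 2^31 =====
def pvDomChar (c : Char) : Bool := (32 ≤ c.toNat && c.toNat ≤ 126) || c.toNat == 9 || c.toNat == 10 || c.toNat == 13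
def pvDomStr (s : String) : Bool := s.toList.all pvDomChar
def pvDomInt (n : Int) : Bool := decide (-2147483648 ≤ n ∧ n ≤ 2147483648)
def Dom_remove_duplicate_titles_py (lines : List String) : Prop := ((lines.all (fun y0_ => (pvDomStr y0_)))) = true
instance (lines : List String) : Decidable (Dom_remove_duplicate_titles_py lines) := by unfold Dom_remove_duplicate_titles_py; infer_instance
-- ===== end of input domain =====

-- B replaces A's stateful flag-and-continue scan with a precomputed first-H1 index plus an index filter (alternative decomposition, same cost).

-- ===== PORT A =====
-- literal port of A: fold carrying (seen_h1, result)
def remove_duplicate_titles_py (lines : List String) : List String :=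
  (lines.foldl (fun (st : Bool × List String) line =>
      if PySem.Str.startswith line "# " then
        if st.1 then st
        else (true, st.2 ++ [line])
      else (st.1, st.2 ++ [line]))
    (false, [])).2

-- ===== PORT B =====
-- literal port of Source B: first = next((i for i,l in enumerate(lines) if l.startswith("# ")), None);
-- then the comprehension keeping l iff not H1 or i == first
def remove_duplicate_titles_py_alt (lines : List String) : List String :=
  let first : Option Int :=
    (PySem.List.enumerate lines).findSome?
      (fun p => if PySem.Str.startswith p.2 "# " then some p.1 else none)
  ((PySem.List.enumerate lines).filter
      (fun p => !PySem.Str.startswith p.2 "# " || first == some p.1)).map (·.2)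

-- ===== PRECONDITION & SPEC =====
def Spec_remove_duplicate_titles_py (lines : List String) (out : List String) : Prop := out = remove_duplicate_titles_py_alt lines
instance (lines : List String) (out : List String) : Decidable (Spec_remove_duplicate_titles_py lines out) := by unfold Spec_remove_duplicate_titles_py; infer_instance

-- ===== CLAIM (what is proved, stated in full; the proofs are below) =====
def Claim_equal_remove_duplicate_titles_py : Prop := ∀ (lines : List String), Dom_remove_duplicate_titles_py lines → Spec_remove_duplicate_titles_py lines (remove_duplicate_titles_py lines)

-- ===== LEMMAS AND PROOFS =====

-- abbreviations for the proofs
def pvPred (l : String) : Bool := PySem.Str.startswith l "# "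

def pvStep (st : Bool × List String) (line : String) : Bool × List String :=
  if PySem.Str.startswith line "# " then
    if st.1 then st else (true, st.2 ++ [line])
  else (st.1, st.2 ++ [line])

-- B generalized over the enumeration start offset
def pvAltFrom (s : Int) (lines : List String) : List String :=
  let first : Option Int :=
    (PySem.List.enumerate lines s).findSome?
      (fun p => if PySem.Str.startswith p.2 "# " then some p.1 else none)
  ((PySem.List.enumerate lines s).filter
      (fun p => !PySem.Str.startswith p.2 "# " || first == some p.1)).map (·.2)

theorem alt_eq_altFrom (lines : List String) :
    remove_duplicate_titles_py_alt lines = pvAltFrom 0 lines := rfl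

-- after the first H1 was seen, A just filters out H1 lines
theorem foldl_seen (lines : List String) (acc : List String) :
    (lines.foldl pvStep (true, acc)).2 = acc ++ lines.filter (fun l => !pvPred l) := by
  induction lines generalizing acc with
  | nil => simp
  | cons l ls ih =>
    simp only [List.foldl_cons, List.filter_cons, pvStep, pvPred]
    by_cases h : PySem.Chars.startswith l.toList ['#', ' '] = true
    · simp [h, ih, pvPred]
    · simp [h, ih, pvPred]

-- once the offset is past the first index f, the index test never fires
theorem filter_past (lines : List String) (s f : Int) (hf : f < s) :
    ((PySem.List.enumerate lines s).filter
        (fun p => !PySem.Str.startswith p.2 "# " || (some f : Option Int) == some p.1)).map (·.2)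
      = lines.filter (fun l => !pvPred l) := by
  induction lines generalizing s with
  | nil => simp [PySem.List.enumerate_nil]
  | cons l ls ih =>
    have hne : f ≠ s := by omega
    by_cases h : PySem.Chars.startswith l.toList ['#', ' '] = true
    · simp [PySem.List.enumerate_cons, h, hne, pvPred]
      simpa [pvPred] using ih (s + 1) (by omega)
    · simp [PySem.List.enumerate_cons, h, pvPred]
      simpa [pvPred] using ih (s + 1) (by omega)

-- pvAltFrom on a cons whose head is an H1 line
theorem altFrom_cons_pos (l : String) (ls : List String) (s : Int)
    (h : PySem.Chars.startswith l.toList ['#', ' '] = true) :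
    pvAltFrom s (l :: ls) = l :: ls.filter (fun x => !pvPred x) := by
  have hfp := filter_past ls (s + 1) s (by omega)
  simp only [pvAltFrom, PySem.List.enumerate_cons, List.findSome?_cons]
  simp [h, pvPred] at hfp ⊢
  exact hfp

-- pvAltFrom on a cons whose head is not an H1 line
theorem altFrom_cons_neg (l : String) (ls : List String) (s : Int)
    (h : PySem.Chars.startswith l.toList ['#', ' '] = false) :
    pvAltFrom s (l :: ls) = l :: pvAltFrom (s + 1) ls := by
  simp only [pvAltFrom, PySem.List.enumerate_cons, List.findSome?_cons]
  simp [h]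

theorem main_aux (lines : List String) (acc : List String) (s : Int) :
    (lines.foldl pvStep (false, acc)).2 = acc ++ pvAltFrom s lines := by
  induction lines generalizing acc s with
  | nil => simp [pvAltFrom, PySem.List.enumerate_nil]
  | cons l ls ih =>
    rw [List.foldl_cons]
    by_cases h : PySem.Chars.startswith l.toList ['#', ' '] = true
    · have hstep : pvStep (false, acc) l = (true, acc ++ [l]) := by simp [pvStep, h]
      rw [hstep, foldl_seen ls (acc ++ [l]), altFrom_cons_pos l ls s h]
      simp
    · rw [Bool.not_eq_true] at h
      have hstep : pvStep (false, acc) l = (false, acc ++ [l]) := by simp [pvStep, h]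
      rw [hstep, ih (acc ++ [l]) (s + 1), altFrom_cons_neg l ls s h]
      simp

-- ===== VERDICT (by name: the statement is the Claim_ definition above) =====
theorem remove_duplicate_titles_py_spec : Claim_equal_remove_duplicate_titles_py := by
  intro lines _
  unfold Spec_remove_duplicate_titles_py
  rw [alt_eq_altFrom]
  have := main_aux lines [] 0
  simpa [remove_duplicate_titles_py, pvStep] using this
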